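-- pv_equiv track=rewrite | github.com/yowatanabe/learn-to-code | python/376/main.py | min_replacements_to_unify
-- ===== SOURCE A (Python) =====
-- from typing import List, Dict
-- from collections import Counter
--
-- class DSU:
--     def __init__(self):
--         self.parent: Dict[str, str] = {}
--         self.size: Dict[str, int] = {}
--
--     def _add(self, x: str) -> None:
--         if x not in self.parent:
--             self.parent[x] = x
--             self.size[x] = 1
--
--     def find(self, x: str) -> str:
--         self._add(x)
--         # path compression
--         while self.parent[x] != x:
--             self.parent[x] = self.parent[self.parent[x]]
--             x = self.parent[x]
--         return x
--
--     def union(self, a: str, b: str) -> None: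
--         ra, rb = self.find(a), self.find(b)
--         if ra == rb:
--             return
--         # union by size
--         if self.size[ra] < self.size[rb]:
--             ra, rb = rb, ra
--         self.parent[rb] = ra
--         self.size[ra] += self.size[rb]
--
-- def min_replacements_to_unify(ids: List[str], pairs: List[List[str]]) -> int:
--     """
--     すべての要素を同じ文字列にできるか？
--     - 全要素が同一グループ（DSUの同一root）に属する必要がある
--     できるなら、最小置換回数 = n - (最頻出のID回数) ではなく、
--     「同一グループ内のどのIDに統一するか」なので
--     n - (ids内で最も多く出るIDの出現回数) が最小。
--     ※全IDが同一グループに属する場合のみ成立。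
--     """
--     n = len(ids)
--     if n == 0:
--         return 0
--
--     dsu = DSU()
--     # union関係を構築
--     for a, b in pairs:
--         dsu.union(a, b)
--
--     # ids に現れるものが同一グループかチェック
--     roots = {dsu.find(x) for x in ids}
--     if len(roots) != 1:
--         return -1
--
--     # 同一グループなら、ids内で最頻出のIDに合わせるのが最小置換
--     freq = Counter(ids)
--     keep = max(freq.values())
--     return n - keep
-- ===== SOURCE B (Python) =====
-- from collections import Counter
--
-- def min_replacements_to_unify(ids, pairs):
--     n = len(ids)
--     if n == 0:
--         return 0
--
--     # flat representative map: rep.get(x, x) is x's group label;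
--     # each pair merges two labels by rewriting one onto the other
--     rep = {}
--     for a, b in pairs:
--         ra = rep.get(a, a)
--         rb = rep.get(b, b)
--         if ra != rb:
--             rep = {k: (ra if v == rb else v) for k, v in rep.items()}
--             rep[a] = ra
--             rep[b] = ra
--
--     if len({rep.get(x, x) for x in ids}) != 1:
--         return -1
--
--     keep = max(Counter(ids).values())
--     return n - keep
-- ===== Notes on version B (the rewrite author's own statement) =====
-- stated objective: simpler
-- what changed: A's union-find forest (parent/size dicts, find loop with path compression, union by size) is replaced by a flat representative map: each pair relabels one whole class onto the other in a single dict rewrite, and connectivity is read off directly from the map, with no tree walking and no size bookkeeping.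
import Mathlib
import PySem

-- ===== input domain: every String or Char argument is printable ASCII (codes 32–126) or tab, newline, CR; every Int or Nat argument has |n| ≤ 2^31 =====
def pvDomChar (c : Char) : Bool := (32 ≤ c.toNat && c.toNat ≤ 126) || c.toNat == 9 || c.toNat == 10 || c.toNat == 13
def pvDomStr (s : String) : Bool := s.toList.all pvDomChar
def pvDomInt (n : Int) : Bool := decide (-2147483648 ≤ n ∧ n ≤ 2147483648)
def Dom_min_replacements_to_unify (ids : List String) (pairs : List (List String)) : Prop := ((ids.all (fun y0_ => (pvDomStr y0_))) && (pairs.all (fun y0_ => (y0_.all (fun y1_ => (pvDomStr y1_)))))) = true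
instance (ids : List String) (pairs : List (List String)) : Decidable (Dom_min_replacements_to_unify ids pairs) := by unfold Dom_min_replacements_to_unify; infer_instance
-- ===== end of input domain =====

-- B replaces A's union-find forest (path compression, union by size) by a flat
-- representative map that relabels one whole class per pair: simpler, no search structure.

-- ===== PORT A =====
-- DSU state: (parent, size) dicts
abbrev PVDsu := PySem.Dict String String × PySem.Dict String Int

-- the while-loop of DSU.find (path compression); fuel is a totality guard only
def pvFindLoop (fuel : Nat) (parent : PySem.Dict String String) (x : String) :
    PySem.Dict String String × String :=
  match fuel with
  | 0 => (parent, x)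
  | fuel + 1 =>
    if parent.getD x x ≠ x then
      let px := parent.getD x x
      let ppx := parent.getD px px
      pvFindLoop fuel (parent.insert x ppx) ppx
    else (parent, x)

-- DSU._add
def pvDsuAdd (st : PVDsu) (x : String) : PVDsu :=
  if ¬ st.1.contains x then (st.1.insert x x, st.2.insert x 1) else st

-- DSU.find (parent[y] is always a present key in Python here; getD y y is exact)
def pvDsuFind (st : PVDsu) (x : String) : PVDsu × String :=
  let st1 := pvDsuAdd st x
  let r := pvFindLoop (st1.1.size + 1) st1.1 x
  ((r.1, st1.2), r.2)

-- DSU.union (size[r] is always a present key in Python here; getD r 0 is exact)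
def pvDsuUnion (st : PVDsu) (a b : String) : PVDsu :=
  let fa := pvDsuFind st a
  let fb := pvDsuFind fa.1 b
  let ra := fa.2
  let rb := fb.2
  let st2 := fb.1
  if ra = rb then st2
  else
    let rr := if st2.2.getD ra 0 < st2.2.getD rb 0 then (rb, ra) else (ra, rb)
    (st2.1.insert rr.2 rr.1, st2.2.insert rr.1 (st2.2.getD rr.1 0 + st2.2.getD rr.2 0))

def min_replacements_to_unify (ids : List String) (pairs : List (List String)) : Int :=
  let n := ids.length
  if n = 0 then 0
  else
    -- for a, b in pairs: dsu.union(a, b)   (a row not of length 2 raises in Python: outside Pre_)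
    let dsu := pairs.foldl (fun st p =>
      match p with
      | [a, b] => pvDsuUnion st a b
      | _ => st) (PySem.Dict.empty, PySem.Dict.empty)
    -- roots = {dsu.find(x) for x in ids}  (find mutates the DSU, so the state is threaded)
    let fr := ids.foldl (fun (acc : PVDsu × PySem.Set String) x =>
      let f := pvDsuFind acc.1 x
      (f.1, PySem.Set.add acc.2 f.2)) (dsu, PySem.Set.empty)
    if fr.2.length ≠ 1 then -1
    else
      -- keep = max(Counter(ids).values())  (values nonempty since n ≠ 0)
      let keep := (PySem.List.max? (PySem.Dict.counter ids).values (fun v => v)).getD 0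
      (n : Int) - keep

-- ===== PORT B =====
-- body of B's loop over pairs: merge the labels of a and b by relabelling rb to ra
def pvRelabel (rep : PySem.Dict String String) (a b : String) : PySem.Dict String String :=
  let ra := rep.getD a a
  let rb := rep.getD b b
  if ra = rb then rep
  else
    -- rep = {k: (ra if v == rb else v) for k, v in rep.items()}  (keys stay distinct)
    let rep2 := PySem.Dict.mk (rep.items.map (fun kv => (kv.1, if kv.2 = rb then ra else kv.2)))
    (rep2.insert a ra).insert b ra

def min_replacements_to_unify_alt (ids : List String) (pairs : List (List String)) : Int :=
  let n := ids.length
  if n = 0 then 0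
  else
    let rep := pairs.foldl (fun (rep : PySem.Dict String String) p =>
      match p with
      | [a, b] => pvRelabel rep a b
      | [] => rep
      | [_] => rep
      | _ :: _ :: _ :: _ => rep) PySem.Dict.empty
    if (PySem.Set.ofList (ids.map (fun x => rep.getD x x))).length ≠ 1 then -1
    else
      let keep := (PySem.List.max? (PySem.Dict.counter ids).values (fun v => v)).getD 0
      (n : Int) - keep

-- ===== PRECONDITION & SPEC =====
-- Pre_ excludes exactly the inputs where Python raises: when ids is nonempty (no early
-- return 0), a row of `pairs` that is not a 2-element list makes `for a, b in pairs`
-- raise ValueError (in A and in B alike).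
def Pre_min_replacements_to_unify (ids : List String) (pairs : List (List String)) : Prop :=
  ids = [] ∨ ∀ p ∈ pairs, p.length = 2
instance (ids : List String) (pairs : List (List String)) : Decidable (Pre_min_replacements_to_unify ids pairs) := by unfold Pre_min_replacements_to_unify; infer_instance

def pvWitness_min_replacements_to_unify : List String × List (List String) :=
  (["a", "b", "a"], [["a", "b"]])

def Spec_min_replacements_to_unify (ids : List String) (pairs : List (List String)) (out : Int) : Prop := out = min_replacements_to_unify_alt ids pairs
instance (ids : List String) (pairs : List (List String)) (out : Int) : Decidable (Spec_min_replacements_to_unify ids pairs out) := by unfold Spec_min_replacements_to_unify; infer_instance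

-- ===== CLAIM (what is proved, stated in full; the proofs are below) =====
def Claim_equal_min_replacements_to_unify : Prop := ∀ (ids : List String) (pairs : List (List String)), Dom_min_replacements_to_unify ids pairs → Pre_min_replacements_to_unify ids pairs → Spec_min_replacements_to_unify ids pairs (min_replacements_to_unify ids pairs)

-- ===== LEMMAS AND PROOFS =====

-- The lookup function of a parent / representative dict
def pvPf (d : PySem.Dict String String) : String → String := fun y => d.getD y y

def pvFix (f : String → String) (r : String) : Prop := f r = r

def pvReaches (f : String → String) (y r : String) : Prop := pvFix f r ∧ ∃ k, f^[k] y = r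

-- ρ assigns to every node the root of its tree
def pvRootFun (f ρ : String → String) : Prop := ∀ y, pvReaches f y (ρ y)

def pvClosed (d : PySem.Dict String String) : Prop :=
  ∀ y, d.contains (pvPf d y) = true ∨ pvPf d y = y

def pvInvA (d : PySem.Dict String String) (ρ : String → String) : Prop :=
  pvRootFun (pvPf d) ρ ∧ pvClosed d ∧ d.keys.Nodup

def pvInvB (d : PySem.Dict String String) : Prop :=
  (∀ y, pvPf d (pvPf d y) = pvPf d y) ∧ pvClosed d ∧ d.keys.Nodup

-- merging the classes u and v of τ yields τ'
def pvMerge (τ τ' : String → String) (u v : String) : Prop :=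
  ∀ x y, (τ' x = τ' y ↔ (τ x = τ y ∨ ((τ x = u ∨ τ x = v) ∧ (τ y = u ∨ τ y = v))))

def pvMergeFun (τ : String → String) (u v : String) : String → String :=
  fun y => if τ y = v then u else τ y

lemma pvFix_iterate {f : String → String} {r : String} (h : pvFix f r) :
    ∀ k, f^[k] r = r := by
  intro k; induction k with
  | zero => rfl
  | succ k ih => rw [Function.iterate_succ_apply', ih]; exact h

lemma pvReaches_unique {f : String → String} {y r r' : String}
    (h : pvReaches f y r) (h' : pvReaches f y r') : r = r' := by
  obtain ⟨hf, k, hk⟩ := h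
  obtain ⟨hf', k', hk'⟩ := h'
  rcases le_total k k' with hle | hle
  · have : f^[k' - k + k] y = r' := by rw [Nat.sub_add_cancel hle]; exact hk'
    rw [Function.iterate_add_apply, hk, pvFix_iterate hf] at this
    exact this
  · have : f^[k - k' + k'] y = r := by rw [Nat.sub_add_cancel hle]; exact hk
    rw [Function.iterate_add_apply, hk', pvFix_iterate hf'] at this
    exact this.symm

lemma pvRoot_fix {f ρ : String → String} (h : pvRootFun f ρ) {y : String}
    (hy : pvFix f y) : ρ y = y :=
  (pvReaches_unique (h y) ⟨hy, 0, rfl⟩)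

lemma pvRoot_step {f ρ : String → String} (h : pvRootFun f ρ) (y : String) :
    ρ (f y) = ρ y := by
  refine pvReaches_unique (h (f y)) ?_
  obtain ⟨hf, k, hk⟩ := h y
  exact ⟨hf, k, by rw [← Function.iterate_succ_apply, Function.iterate_succ_apply', hk, hf]⟩

lemma pvRoot_absorb {f ρ : String → String} (h : pvRootFun f ρ) {y : String} {k m : Nat}
    (hk : f^[k] y = ρ y) (hkm : k ≤ m) : f^[m] y = ρ y := by
  have : f^[m - k + k] y = f^[m] y := by rw [Nat.sub_add_cancel hkm]
  rw [← this, Function.iterate_add_apply, hk, pvFix_iterate (h y).1]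

lemma pvLift {f f' : String → String} (hs : ∀ z, f' z = f z ∨ f' z = f (f z)) :
    ∀ j y, ∃ m, j ≤ m ∧ f'^[j] y = f^[m] y := by
  intro j; induction j with
  | zero => exact fun y => ⟨0, le_rfl, rfl⟩
  | succ j ih =>
    intro y
    obtain ⟨m, hm, hv⟩ := ih y
    rcases hs (f'^[j] y) with h | h
    · refine ⟨m + 1, by omega, ?_⟩
      rw [Function.iterate_succ_apply', h, hv]
      exact (Function.iterate_succ_apply' f m y).symm
    · refine ⟨m + 2, by omega, ?_⟩
      rw [Function.iterate_succ_apply', h, hv]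
      rw [show m + 2 = m + 1 + 1 from rfl, Function.iterate_succ_apply',
        Function.iterate_succ_apply']

lemma pvCompress {f f' ρ : String → String} (h : pvRootFun f ρ)
    (hs : ∀ z, f' z = f z ∨ f' z = f (f z)) : pvRootFun f' ρ := by
  intro y
  have hfix : pvFix f' (ρ y) := by
    have h1 : f (ρ y) = ρ y := (h y).1
    rcases hs (ρ y) with h2 | h2 <;> rw [pvFix, h2] <;> simp [h1]
  obtain ⟨_, k, hk⟩ := h y
  obtain ⟨m, hm, hv⟩ := pvLift hs k y
  exact ⟨hfix, k, by rw [hv]; exact pvRoot_absorb h hk hm⟩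

-- pvPf after an insert
lemma pvPf_insert (d : PySem.Dict String String) (k v : String) :
    pvPf (d.insert k v) = fun y => if y = k then v else pvPf d y := by
  funext y
  by_cases h : y = k
  · subst h; simp [pvPf, PySem.Dict.getD_insert_self]
  · simp [pvPf, PySem.Dict.getD_insert, h]

lemma pvNotContains_fix {d : PySem.Dict String String} {y : String}
    (h : ¬ d.contains y = true) : pvPf d y = y := by
  have hf : d.contains y = false := by simpa using h
  simp [pvPf, PySem.Dict.getD_of_not_contains d y hf]

-- a reached root of a key is a key
lemma pvRoot_key {d : PySem.Dict String String} {ρ : String → String}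
    (hc : pvClosed d) (hr : pvRootFun (pvPf d) ρ) {y : String}
    (hy : d.contains y = true) : d.contains (ρ y) = true := by
  suffices aux : ∀ (k : Nat) (y : String), d.contains y = true →
      (pvPf d)^[k] y = ρ y → d.contains (ρ y) = true by
    obtain ⟨_, k, hk⟩ := hr y
    exact aux k y hy hk
  intro k
  induction k with
  | zero => intro y hy hk; rwa [← hk]
  | succ k ih =>
    intro y hy hk
    rcases hc y with h | h
    · have h2 : (pvPf d)^[k] (pvPf d y) = ρ (pvPf d y) := by
        rw [pvRoot_step hr, ← Function.iterate_succ_apply]; exact hk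
      have := ih (pvPf d y) h h2
      rwa [pvRoot_step hr] at this
    · rw [pvRoot_fix hr h]; exact hy

-- the minimal distance to the root is at most the number of keys
lemma pvPigeon {d : PySem.Dict String String} {ρ : String → String}
    (hr : pvRootFun (pvPf d) ρ) (y : String) :
    ∃ k ≤ d.size, (pvPf d)^[k] y = ρ y := by
  have hex : ∃ k, (pvPf d)^[k] y = ρ y := (hr y).2
  classical
  set k0 := Nat.find hex with hk0
  have hspec : (pvPf d)^[k0] y = ρ y := Nat.find_spec hex
  have hmin : ∀ j < k0, (pvPf d)^[j] y ≠ ρ y := fun j hj => Nat.find_min hex hj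
  -- every earlier iterate is a non-fixpoint
  have hroot_it : ∀ j, ρ ((pvPf d)^[j] y) = ρ y := by
    intro j; induction j with
    | zero => rfl
    | succ j ih => rw [Function.iterate_succ_apply', pvRoot_step hr, ih]
  have hnf : ∀ j < k0, ¬ pvFix (pvPf d) ((pvPf d)^[j] y) := by
    intro j hj hfix
    exact hmin j hj (by rw [← hroot_it j, pvRoot_fix hr hfix])
  -- distinct
  have hinj : ∀ i j, i < j → j < k0 → (pvPf d)^[i] y ≠ (pvPf d)^[j] y := by
    intro i j hij hj heq
    have : (pvPf d)^[(k0 - j) + i] y = ρ y := by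
      rw [Function.iterate_add_apply, heq, ← Function.iterate_add_apply,
        Nat.sub_add_cancel (le_of_lt hj)]
      exact hspec
    exact hmin _ (by omega) this
  -- all in the keys
  have hmem : ∀ j < k0, (pvPf d)^[j] y ∈ d.keys := by
    intro j hj
    rcases Bool.eq_false_or_eq_true (d.contains ((pvPf d)^[j] y)) with h | h
    · exact (PySem.Dict.contains_iff_mem_keys _ _).1 h
    · exact absurd (pvNotContains_fix (by simp [h])) (hnf j hj)
  have hnodup : ((List.range k0).map (fun j => (pvPf d)^[j] y)).Nodup := by
    refine (List.nodup_range).map_on ?_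
    intro i hi j hj hij
    by_contra hne
    rcases Nat.lt_or_ge i j with h | h
    · exact hinj i j h (List.mem_range.1 hj) hij
    · rcases Nat.lt_or_ge j i with h2 | h2
      · exact hinj j i h2 (List.mem_range.1 hi) hij.symm
      · exact hne (by omega)
  have hsub : ((List.range k0).map (fun j => (pvPf d)^[j] y)) ⊆ d.keys := by
    intro z hz
    obtain ⟨j, hj, rfl⟩ := List.mem_map.1 hz
    exact hmem j (List.mem_range.1 hj)
  have hlen := List.Subperm.length_le (List.Nodup.subperm hnodup hsub)
  rw [List.length_map, List.length_range] at hlen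
  have hsz : d.keys.length = d.size := by
    simp [PySem.Dict.keys, PySem.Dict.size]
  exact ⟨k0, by omega, hspec⟩

-- the find loop returns the root and preserves the invariant, the keys, and ρ
lemma pvFindLoop_spec : ∀ (fuel : Nat) (d : PySem.Dict String String) (x : String)
    (ρ : String → String), pvInvA d ρ → (∃ k < fuel, (pvPf d)^[k] x = ρ x) →
    (pvFindLoop fuel d x).2 = ρ x ∧ pvInvA (pvFindLoop fuel d x).1 ρ ∧
      (∀ y, (pvFindLoop fuel d x).1.contains y = d.contains y) := by
  intro fuel
  induction fuel with
  | zero => intro d x ρ _ hb; obtain ⟨k, hk, _⟩ := hb; omega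
  | succ fuel ih =>
    intro d x ρ hinv hb
    obtain ⟨hr, hc, hn⟩ := hinv
    by_cases hx : pvPf d x = x
    · have : pvFindLoop (fuel + 1) d x = (d, x) := by
        unfold pvFindLoop
        rw [if_neg (by simpa [pvPf] using not_not_intro hx)]
      rw [this]
      exact ⟨(pvRoot_fix hr hx).symm, ⟨hr, hc, hn⟩, fun y => rfl⟩
    · have hcx : d.contains x = true := by
        rcases Bool.eq_false_or_eq_true (d.contains x) with h | h
        · exact h
        · exact absurd (pvNotContains_fix (by simp [h])) hx
      have hstep : pvFindLoop (fuel + 1) d x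
          = pvFindLoop fuel (d.insert x (pvPf d (pvPf d x))) (pvPf d (pvPf d x)) := by
        conv_lhs => rw [pvFindLoop]
        rw [if_pos (by simpa [pvPf] using hx)]
        rfl
      set ppx := pvPf d (pvPf d x) with hppx
      set d' := d.insert x ppx with hd'
      -- the new lookup function only shortcuts
      have hs : ∀ z, pvPf d' z = pvPf d z ∨ pvPf d' z = pvPf d (pvPf d z) := by
        intro z
        rw [hd', pvPf_insert]
        by_cases hz : z = x
        · subst hz; simp only [if_pos]; exact Or.inr hppx
        · simp [hz]
      have hct : ∀ y, d'.contains y = d.contains y := by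
        intro y
        rw [hd', PySem.Dict.contains_insert]
        by_cases hyx : y = x
        · subst hyx; simp [hcx]
        · simp [hyx]
      have hr' : pvRootFun (pvPf d') ρ := pvCompress hr hs
      have hc' : pvClosed d' := by
        intro y
        rw [hct]
        by_cases hyx : y = x
        · subst hyx
          have hv : pvPf d' y = ppx := by rw [hd', pvPf_insert]; simp
        
          rw [hv, hppx]
          rcases hc (pvPf d y) with h | h
          · exact Or.inl h
          · rw [h]
            rcases hc y with h2 | h2
            · exact Or.inl h2
            · exact absurd h2 hx
        · have hv : pvPf d' y = pvPf d y := by rw [hd', pvPf_insert]; simp [hyx]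
          rw [hv]
          exact hc y
      have hn' : d'.keys.Nodup := by
        rw [hd', PySem.Dict.keys_insert_of_contains _ _ hcx]
        exact hn
      -- distance bound for the recursive call
      obtain ⟨k, hk, hkv⟩ := hb
      have hkpos : 1 ≤ k := by
        rcases Nat.eq_zero_or_pos k with h | h
        · exfalso
          apply hx
          rw [show x = ρ x from by rw [← hkv, h]; rfl]
          exact (hr x).1
        · exact h
      have hρppx : ρ ppx = ρ x := by
        rw [hppx, pvRoot_step hr, pvRoot_step hr]
      have hbase : (pvPf d)^[k - 2] ppx = ρ ppx := by
        rcases Nat.lt_or_ge k 2 with h2 | h2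
        · -- k = 1 : pvPf d x = ρ x, so ppx = ρ x
          have hk1 : k = 1 := by omega
          have hfx : pvPf d x = ρ x := by rw [← hkv, hk1]; rfl
          have : ppx = ρ x := by rw [hppx, hfx]; exact (hr x).1
          rw [hρppx, show k - 2 = 0 from by omega]
          exact this
        · have : (pvPf d)^[k - 2 + 2] x = ρ x := by
            rw [Nat.sub_add_cancel h2]; exact hkv
          rw [Function.iterate_add_apply] at this
          rw [hρppx]
          exact this
      obtain ⟨m, hm, hmv⟩ := pvLift hs (k - 2) ppx
      have hb' : ∃ k' < fuel, (pvPf d')^[k'] ppx = ρ ppx := by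
        refine ⟨k - 2, by omega, ?_⟩
        rw [hmv]
        exact pvRoot_absorb hr hbase hm
      obtain ⟨h1, h2, h3⟩ := ih d' ppx ρ ⟨hr', hc', hn'⟩ hb'
      rw [hstep]
      refine ⟨by rw [h1, hρppx], h2, fun y => by rw [h3 y, hct y]⟩

lemma pvDsuAdd_spec (st : PVDsu) (x : String) (ρ : String → String) (h : pvInvA st.1 ρ) :
    pvInvA (pvDsuAdd st x).1 ρ ∧ pvPf (pvDsuAdd st x).1 = pvPf st.1 ∧
      (∀ y, (pvDsuAdd st x).1.contains y = ((y == x) || st.1.contains y)) := by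
  obtain ⟨hr, hc, hn⟩ := h
  unfold pvDsuAdd
  by_cases hcx : st.1.contains x = true
  · rw [if_neg (by simp [hcx])]
    refine ⟨⟨hr, hc, hn⟩, rfl, fun y => ?_⟩
    by_cases hyx : y = x
    · subst hyx; simp [hcx]
    · simp [hyx]
  · rw [if_pos (by simp [hcx])]
    have hpf : pvPf (st.1.insert x x) = pvPf st.1 := by
      funext y
      rw [pvPf_insert]
      by_cases hyx : y = x
      · subst hyx
        simp only [if_true]
        exact (pvNotContains_fix hcx).symm
      · simp [hyx]
    have hct : ∀ y, (st.1.insert x x).contains y = ((y == x) || st.1.contains y) :=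
      fun y => PySem.Dict.contains_insert _ _ _ _
    refine ⟨⟨by rw [hpf]; exact hr, ?_, PySem.Dict.nodup_keys_insert _ _ _ hn⟩, hpf, hct⟩
    intro y
    rw [hpf, hct]
    rcases hc y with h | h
    · left; simp [h]
    · right; exact h

lemma pvDsuFind_spec (st : PVDsu) (x : String) (ρ : String → String) (h : pvInvA st.1 ρ) :
    (pvDsuFind st x).2 = ρ x ∧ pvInvA (pvDsuFind st x).1.1 ρ ∧
      (∀ y, (pvDsuFind st x).1.1.contains y = ((y == x) || st.1.contains y)) := by
  obtain ⟨hadd, hpf, hct⟩ := pvDsuAdd_spec st x ρ h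
  obtain ⟨hr1, hc1, hn1⟩ := hadd
  obtain ⟨k, hk, hkv⟩ := pvPigeon hr1 x
  have hb : ∃ k < (pvDsuAdd st x).1.size + 1, (pvPf (pvDsuAdd st x).1)^[k] x = ρ x :=
    ⟨k, by omega, hkv⟩
  obtain ⟨h1, h2, h3⟩ := pvFindLoop_spec ((pvDsuAdd st x).1.size + 1)
    (pvDsuAdd st x).1 x ρ ⟨hr1, hc1, hn1⟩ hb
  exact ⟨h1, h2, fun y => by rw [show (pvDsuFind st x).1.1
      = (pvFindLoop ((pvDsuAdd st x).1.size + 1) (pvDsuAdd st x).1 x).1 from rfl,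
    h3 y, hct y]⟩

lemma pvMerge_eq (τ : String → String) (u : String) : pvMerge τ τ u u := by
  intro x y
  constructor
  · exact fun h => Or.inl h
  · rintro (h | ⟨(h1 | h1), (h2 | h2)⟩) <;> simp_all

lemma pvMergeFun_char (τ : String → String) (u v : String) :
    pvMerge τ (pvMergeFun τ u v) u v := by
  intro x y
  unfold pvMergeFun
  by_cases hx : τ x = v <;> by_cases hy : τ y = v
  · rw [if_pos hx, if_pos hy]
    exact ⟨fun _ => Or.inr ⟨Or.inr hx, Or.inr hy⟩, fun _ => rfl⟩
  · rw [if_pos hx, if_neg hy]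
    constructor
    · intro h; exact Or.inr ⟨Or.inr hx, Or.inl h.symm⟩
    · rintro (h | ⟨h1 | h1, h2 | h2⟩)
      · exact absurd (h ▸ hx) hy
      · exact h2.symm
      · exact absurd h2 hy
      · exact h2.symm
      · exact absurd h2 hy
  · rw [if_neg hx, if_pos hy]
    constructor
    · intro h; exact Or.inr ⟨Or.inl h, Or.inr hy⟩
    · rintro (h | ⟨h1 | h1, h2 | h2⟩)
      · exact absurd (h.symm ▸ hy) hx
      · exact h1
      · exact h1
      · exact absurd h1 hx
      · exact absurd h1 hx
  · rw [if_neg hx, if_neg hy]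
    constructor
    · exact Or.inl
    · rintro (h | ⟨h1 | h1, h2 | h2⟩)
      · exact h
      · exact h1.trans h2.symm
      · exact absurd h2 hy
      · exact absurd h1 hx
      · exact absurd h1 hx

lemma pvMerge_comm {τ τ' : String → String} {u v : String} (h : pvMerge τ τ' u v) :
    pvMerge τ τ' v u := by
  intro x y
  rw [h x y]; tauto

-- iterating never changes the root
lemma pvRoot_iterate {f ρ : String → String} (hr : pvRootFun f ρ) (y : String) :
    ∀ j, ρ (f^[j] y) = ρ y := by
  intro j; induction j with
  | zero => rfl
  | succ j ih => rw [Function.iterate_succ_apply', pvRoot_step hr, ih]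

-- link step of the DSU: pointing root v at root u keeps a valid root function
lemma pvLink {f ρ : String → String} {u v : String} (hr : pvRootFun f ρ)
    (hu : pvFix f u) (hv : pvFix f v) (huv : v ≠ u) :
    pvRootFun (fun z => if z = v then u else f z) (pvMergeFun ρ u v) := by
  intro y
  classical
  set f3 : String → String := fun z => if z = v then u else f z with hf3
  have hfixu : pvFix f3 u := by
    show (if u = v then u else f u) = u
    rw [if_neg (Ne.symm huv)]; exact hu
  have hex : ∃ k, f^[k] y = ρ y := (hr y).2
  set k0 := Nat.find hex with hk0
  have hspec : f^[k0] y = ρ y := Nat.find_spec hex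
  have hmin : ∀ j < k0, f^[j] y ≠ ρ y := fun j hj => Nat.find_min hex hj
  have hnv : ∀ j < k0, f^[j] y ≠ v := by
    intro j hj heq
    have : ρ y = v := by
      rw [← pvRoot_iterate hr y j, heq, pvRoot_fix hr hv]
    exact hmin j hj (by rw [heq, this])
  have hsame : ∀ j ≤ k0, f3^[j] y = f^[j] y := by
    intro j hj
    induction j with
    | zero => rfl
    | succ j ih =>
      rw [Function.iterate_succ_apply', Function.iterate_succ_apply',
        ih (by omega)]
      show (if f^[j] y = v then u else f (f^[j] y)) = f (f^[j] y)
      rw [if_neg (hnv j (by omega))]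
  by_cases hρ : ρ y = v
  · refine ⟨?_, k0 + 1, ?_⟩
    · show pvFix f3 (pvMergeFun ρ u v y)
      unfold pvMergeFun
      rw [if_pos hρ]; exact hfixu
    · unfold pvMergeFun
      rw [if_pos hρ, Function.iterate_succ_apply', hsame k0 le_rfl, hspec, hρ]
      show (if v = v then u else f v) = u
      rw [if_pos rfl]
  · refine ⟨?_, k0, ?_⟩
    · show pvFix f3 (pvMergeFun ρ u v y)
      unfold pvMergeFun
      rw [if_neg hρ]
      show (if ρ y = v then u else f (ρ y)) = ρ y
      rw [if_neg hρ]; exact (hr y).1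
    · unfold pvMergeFun
      rw [if_neg hρ, hsame k0 le_rfl]; exact hspec

set_option maxHeartbeats 1000000 in
lemma pvDsuUnion_spec (st : PVDsu) (a b : String) (ρ : String → String)
    (h : pvInvA st.1 ρ) :
    ∃ ρ', pvInvA (pvDsuUnion st a b).1 ρ' ∧ pvMerge ρ ρ' (ρ a) (ρ b) := by
  obtain ⟨ha1, ha2, ha3⟩ := pvDsuFind_spec st a ρ h
  obtain ⟨hb1, hb2, hb3⟩ := pvDsuFind_spec (pvDsuFind st a).1 b ρ ha2
  obtain ⟨hr2, hc2, hn2⟩ := hb2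
  set d2 := (pvDsuFind (pvDsuFind st a).1 b).1.1 with hd2
  have hc2a : d2.contains a = true := by rw [hb3 a, ha3 a]; simp
  have hc2b : d2.contains b = true := by rw [hb3 b]; simp
  have hc2ρa : d2.contains (ρ a) = true := pvRoot_key hc2 hr2 hc2a
  have hc2ρb : d2.contains (ρ b) = true := pvRoot_key hc2 hr2 hc2b
  have hfa : pvFix (pvPf d2) (ρ a) := (hr2 a).1
  have hfb : pvFix (pvPf d2) (ρ b) := (hr2 b).1
  by_cases hab : (pvDsuFind st a).2 = (pvDsuFind (pvDsuFind st a).1 b).2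
  · have hres : pvDsuUnion st a b = (pvDsuFind (pvDsuFind st a).1 b).1 := by
      unfold pvDsuUnion
      rw [if_pos hab]
    rw [hres]
    have hρab : ρ a = ρ b := by rw [← ha1, ← hb1]; exact hab
    exact ⟨ρ, ⟨hr2, hc2, hn2⟩, by rw [hρab]; exact pvMerge_eq ρ (ρ b)⟩
  · have hρab : ρ a ≠ ρ b := by rw [← ha1, ← hb1]; exact hab
    -- in either swap branch the new parent dict is d2.insert v u with {u,v} = {ρ a, ρ b}
    have hmk : ∀ (u v : String), u ≠ v → pvFix (pvPf d2) u → pvFix (pvPf d2) v →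
        d2.contains u = true → pvInvA (d2.insert v u) (pvMergeFun ρ u v) := by
      intro u v huv hfu hfv hcu
      have hpf3 : pvPf (d2.insert v u) = fun z => if z = v then u else pvPf d2 z :=
        pvPf_insert d2 v u
      refine ⟨?_, ?_, PySem.Dict.nodup_keys_insert _ _ _ hn2⟩
      · rw [hpf3]
        exact pvLink hr2 hfu hfv (Ne.symm huv)
      · intro y
        rw [hpf3, PySem.Dict.contains_insert]
        by_cases hyv : y = v
        · subst hyv
          left
          simp [hcu]
        · simp only [if_neg hyv]
          rcases hc2 y with h2 | h2
          · left; simp [h2]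
          · right; exact h2
    by_cases hsz : (pvDsuFind (pvDsuFind st a).1 b).1.2.getD (pvDsuFind st a).2 0
        < (pvDsuFind (pvDsuFind st a).1 b).1.2.getD (pvDsuFind (pvDsuFind st a).1 b).2 0
    · have hres : (pvDsuUnion st a b).1 = d2.insert (ρ a) (ρ b) := by
        unfold pvDsuUnion
        rw [if_neg hab, if_pos hsz]
        show d2.insert (pvDsuFind st a).2 (pvDsuFind (pvDsuFind st a).1 b).2 = _
        rw [ha1, hb1]
      rw [hres]
      exact ⟨pvMergeFun ρ (ρ b) (ρ a),
        hmk (ρ b) (ρ a) (Ne.symm hρab) hfb hfa hc2ρb,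
        pvMerge_comm (pvMergeFun_char ρ (ρ b) (ρ a))⟩
    · have hres : (pvDsuUnion st a b).1 = d2.insert (ρ b) (ρ a) := by
        unfold pvDsuUnion
        rw [if_neg hab, if_neg hsz]
        show d2.insert (pvDsuFind (pvDsuFind st a).1 b).2 (pvDsuFind st a).2 = _
        rw [ha1, hb1]
      rw [hres]
      exact ⟨pvMergeFun ρ (ρ a) (ρ b),
        hmk (ρ a) (ρ b) hρab hfa hfb hc2ρa,
        pvMergeFun_char ρ (ρ a) (ρ b)⟩

-- B's relabelling step computes exactly pvMergeFun on representatives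
lemma pvGet?_mk_map (l : List (String × String)) (f : String → String) (y : String) :
    (PySem.Dict.mk (l.map (fun kv => (kv.1, f kv.2)))).get? y
      = ((PySem.Dict.mk l).get? y).map f := by
  induction l with
  | nil => rfl
  | cons p t ih =>
    rcases p with ⟨k, v⟩
    simp only [List.map_cons]
    rw [PySem.Dict.get?_mk_cons, PySem.Dict.get?_mk_cons]
    by_cases hk : (k == y) = true
    · rw [if_pos hk, if_pos hk]; rfl
    · rw [if_neg hk, if_neg hk]; exact ih

lemma pvKeys_mk_map (l : List (String × String)) (f : String → String) :
    (PySem.Dict.mk (l.map (fun kv => (kv.1, f kv.2)))).keys = (PySem.Dict.mk l).keys := by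
  rw [PySem.Dict.keys_mk, PySem.Dict.keys_mk, List.map_map]
  rfl

lemma pvMk_items (d : PySem.Dict String String) : PySem.Dict.mk d.items = d := rfl

lemma pvRelabel_spec (d : PySem.Dict String String) (a b : String) (h : pvInvB d) :
    pvInvB (pvRelabel d a b) ∧
      pvMerge (pvPf d) (pvPf (pvRelabel d a b)) (pvPf d a) (pvPf d b) := by
  obtain ⟨hid, hcB, hnB⟩ := h
  by_cases hrab : d.getD a a = d.getD b b
  · have hres : pvRelabel d a b = d := by
      unfold pvRelabel
      rw [if_pos hrab]
    rw [hres]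
    have : pvPf d a = pvPf d b := hrab
    exact ⟨⟨hid, hcB, hnB⟩, by rw [this]; exact pvMerge_eq (pvPf d) (pvPf d b)⟩
  · have hrab' : pvPf d a ≠ pvPf d b := hrab
    set g : String × String → String × String :=
      fun kv => (kv.1, if kv.2 = d.getD b b then d.getD a a else kv.2) with hg
    have hres : pvRelabel d a b
        = ((PySem.Dict.mk (d.items.map g)).insert a (d.getD a a)).insert b (d.getD a a) := by
      unfold pvRelabel
      rw [if_neg hrab]
    -- the new lookup function
    have hfun : pvPf (pvRelabel d a b) = pvMergeFun (pvPf d) (pvPf d a) (pvPf d b) := by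
      funext y
      rw [hres, pvPf_insert]
      simp only []
      by_cases hyb : y = b
      · subst hyb
        rw [if_pos rfl]
        unfold pvMergeFun
        rw [if_pos rfl]
        rfl
      · rw [if_neg hyb, pvPf_insert]
        simp only []
        by_cases hya : y = a
        · subst hya
          rw [if_pos rfl]
          unfold pvMergeFun
          rw [ite_self]
          rfl
        · rw [if_neg hya]
          unfold pvMergeFun
          show (PySem.Dict.mk (d.items.map g)).getD y y = _
          rw [PySem.Dict.getD_eq_get?_getD]
          have hmapped : (PySem.Dict.mk (d.items.map g)).get? y
              = ((PySem.Dict.mk d.items).get? y).map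
                  (fun v => if v = d.getD b b then d.getD a a else v) := by
            rw [hg]
            exact pvGet?_mk_map d.items (fun v => if v = d.getD b b then d.getD a a else v) y
          rw [hmapped, pvMk_items]
          cases hq : d.get? y with
          | some w =>
            have hw : pvPf d y = w := by
              rw [pvPf, PySem.Dict.getD_eq_get?_getD, hq]; rfl
            rw [hw]
            rfl
          | none =>
            have hnc : ¬ d.contains y = true := by
              rw [PySem.Dict.contains_eq_isSome_get?, hq]
              simp
            have hfy : pvPf d y = y := pvNotContains_fix hnc
            rw [hfy]
            have hynb : y ≠ pvPf d b := by
              rcases hcB b with h2 | h2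
              · intro hh; rw [hh] at hnc; exact hnc h2
              · rw [h2]; exact hyb
            rw [if_neg hynb]
            rfl
    -- contains on the new dict
    have hct : ∀ z, (pvRelabel d a b).contains z
        = ((z == b) || ((z == a) || d.contains z)) := by
      intro z
      rw [hres, PySem.Dict.contains_insert, PySem.Dict.contains_insert]
      have : (PySem.Dict.mk (d.items.map g)).contains z = d.contains z := by
        conv_rhs => rw [← pvMk_items d]
        rw [PySem.Dict.contains_mk, PySem.Dict.contains_mk, hg, List.any_map]
        rfl
      rw [this]
    have hra : pvPf d (pvPf d a) = pvPf d a := hid a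
    refine ⟨⟨?_, ?_, ?_⟩, by rw [hfun]; exact pvMergeFun_char (pvPf d) (pvPf d a) (pvPf d b)⟩
    · -- idempotent
      intro y
      rw [hfun]
      unfold pvMergeFun
      by_cases hy : pvPf d y = pvPf d b
      · rw [if_pos hy, if_neg (by rw [hra]; exact hrab')]
        exact hra
      · rw [if_neg hy, if_neg (by rw [hid y]; exact hy)]
        exact hid y
    · -- closed
      intro y
      rw [hfun]
      unfold pvMergeFun
      by_cases hy : pvPf d y = pvPf d b
      · rw [if_pos hy]
        left
        rw [hct]
        rcases hcB a with h2 | h2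
        · simp [h2]
        · rw [h2]; simp
      · rw [if_neg hy]
        rcases hcB y with h2 | h2
        · left; rw [hct]; simp [h2]
        · right; exact h2
    · -- nodup keys
      rw [hres]
      refine PySem.Dict.nodup_keys_insert _ _ _ (PySem.Dict.nodup_keys_insert _ _ _ ?_)
      rw [hg, pvKeys_mk_map d.items (fun v => if v = d.getD b b then d.getD a a else v),
        pvMk_items]
      exact hnB

-- folding the pairs keeps a root function for A, the invariant for B, and the bisimulation
lemma pvFold_bisim : ∀ (pairs : List (List String)) (stA : PVDsu)
    (dB : PySem.Dict String String) (ρ : String → String),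
    pvInvA stA.1 ρ → pvInvB dB → (∀ x y, ρ x = ρ y ↔ pvPf dB x = pvPf dB y) →
    ∃ ρ', pvInvA ((pairs.foldl (fun st p => match p with
        | [a, b] => pvDsuUnion st a b
        | _ => st) stA).1) ρ' ∧
      pvInvB (pairs.foldl (fun rep p => match p with
        | [a, b] => pvRelabel rep a b
        | [] => rep
        | [_] => rep
        | _ :: _ :: _ :: _ => rep) dB) ∧
      (∀ x y, ρ' x = ρ' y ↔
        pvPf (pairs.foldl (fun rep p => match p with
          | [a, b] => pvRelabel rep a b
          | [] => rep
          | [_] => rep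
          | _ :: _ :: _ :: _ => rep) dB) x =
        pvPf (pairs.foldl (fun rep p => match p with
          | [a, b] => pvRelabel rep a b
          | [] => rep
          | [_] => rep
          | _ :: _ :: _ :: _ => rep) dB) y) := by
  intro pairs
  induction pairs with
  | nil => intro stA dB ρ hA hB hbis; exact ⟨ρ, hA, hB, hbis⟩
  | cons p t ih =>
    intro stA dB ρ hA hB hbis
    rw [List.foldl_cons, List.foldl_cons]
    rcases p with _ | ⟨a, _ | ⟨b, _ | ⟨c, r⟩⟩⟩
    · exact ih stA dB ρ hA hB hbis
    · exact ih stA dB ρ hA hB hbis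
    · obtain ⟨ρ', hA', hmergeA⟩ := pvDsuUnion_spec stA a b ρ hA
      obtain ⟨hB', hmergeB⟩ := pvRelabel_spec dB a b hB
      refine ih (pvDsuUnion stA a b) (pvRelabel dB a b) ρ' hA' hB' ?_
      intro x y
      rw [hmergeA x y, hmergeB x y, hbis x y, hbis x a, hbis x b, hbis y a, hbis y b]
    · exact ih stA dB ρ hA hB hbis

-- the threaded roots-collection loop collects exactly the ρ-images
lemma pvRoots_fold : ∀ (ids : List String) (st : PVDsu) (s : PySem.Set String)
    (ρ : String → String), pvInvA st.1 ρ →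
    (ids.foldl (fun (acc : PVDsu × PySem.Set String) x =>
      let f := pvDsuFind acc.1 x
      (f.1, PySem.Set.add acc.2 f.2)) (st, s)).2
      = ids.foldl (fun s x => PySem.Set.add s (ρ x)) s := by
  intro ids
  induction ids with
  | nil => intro st s ρ _; rfl
  | cons x t ih =>
    intro st s ρ h
    rw [List.foldl_cons, List.foldl_cons]
    obtain ⟨h1, h2, _⟩ := pvDsuFind_spec st x ρ h
    show (t.foldl _ ((pvDsuFind st x).1, PySem.Set.add s (pvDsuFind st x).2)).2 = _
    rw [h1]
    exact ih (pvDsuFind st x).1 (PySem.Set.add s (ρ x)) ρ h2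

-- a set built from a list has one element iff the list is nonempty and constant
lemma pvSet_len_one (l : List String) :
    (PySem.Set.ofList l).length = 1 ↔ (l ≠ [] ∧ ∀ x ∈ l, ∀ y ∈ l, x = y) := by
  cases l with
  | nil =>
    rw [show PySem.Set.ofList ([] : List String) = [] from rfl]
    simp
  | cons x t =>
    rw [PySem.Set.ofList_cons]
    simp only [List.length_cons]
    constructor
    · intro h
      have hd : (PySem.Set.ofList t).discard x = [] := by
        have : ((PySem.Set.ofList t).discard x).length = 0 := by omega
        exact List.eq_nil_of_length_eq_zero this
      refine ⟨List.cons_ne_nil x t, ?_⟩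
      have hall : ∀ y ∈ t, y = x := by
        intro y hy
        by_contra hne
        have : y ∈ (PySem.Set.ofList t).discard x :=
          (PySem.Set.mem_discard _ _ _).2 ⟨(PySem.Set.mem_ofList _ _).2 hy, hne⟩
        rw [hd] at this
        exact absurd this (List.not_mem_nil)
      intro u hu v hv
      have hu' : u = x := by
        rcases List.mem_cons.1 hu with h' | h'
        · exact h'
        · exact hall u h'
      have hv' : v = x := by
        rcases List.mem_cons.1 hv with h' | h'
        · exact h'
        · exact hall v h'
      rw [hu', hv']
    · rintro ⟨-, hall⟩
      have hd : (PySem.Set.ofList t).discard x = [] := by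
        refine List.eq_nil_iff_forall_not_mem.2 ?_
        intro y hy
        obtain ⟨hy1, hy2⟩ := (PySem.Set.mem_discard _ _ _).1 hy
        exact hy2 (hall y (List.mem_cons_of_mem _ ((PySem.Set.mem_ofList _ _).1 hy1)) x
          (List.mem_cons_self))
      rw [hd]
      rfl

theorem min_replacements_to_unify_spec : Claim_equal_min_replacements_to_unify := by
  intro ids pairs hdom hpre
  unfold Spec_min_replacements_to_unify
  unfold min_replacements_to_unify min_replacements_to_unify_alt
  by_cases hn : ids.length = 0
  · rw [if_pos hn, if_pos hn]
  · rw [if_neg hn, if_neg hn]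
    simp only []
    have hA0 : pvInvA (((PySem.Dict.empty, PySem.Dict.empty) : PVDsu)).1 (fun y => y) := by
      refine ⟨fun y => ⟨?_, 0, rfl⟩, fun y => Or.inr ?_, PySem.Dict.nodup_keys_empty⟩
      · show pvPf PySem.Dict.empty y = y
        simp [pvPf, PySem.Dict.getD_empty]
      · simp [pvPf, PySem.Dict.getD_empty]
    have hB0 : pvInvB PySem.Dict.empty := by
      refine ⟨fun y => ?_, fun y => Or.inr ?_, PySem.Dict.nodup_keys_empty⟩ <;>
        simp [pvPf, PySem.Dict.getD_empty]
    have hbis0 : ∀ x y, (fun (y : String) => y) x = (fun (y : String) => y) y ↔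
        pvPf PySem.Dict.empty x = pvPf PySem.Dict.empty y := by
      intro x y
      simp [pvPf, PySem.Dict.getD_empty]
    obtain ⟨ρ, hA, hB, hbis⟩ := pvFold_bisim pairs (PySem.Dict.empty, PySem.Dict.empty)
      PySem.Dict.empty (fun y => y) hA0 hB0 hbis0
    rw [pvRoots_fold ids _ PySem.Set.empty ρ hA,
      ← PySem.Set.update_map_eq_foldl_add ids ρ PySem.Set.empty, PySem.Set.update_empty]
    have hiff : (PySem.Set.ofList (ids.map ρ)).length = 1 ↔
        (PySem.Set.ofList (ids.map (fun x => pvPf (pairs.foldl (fun rep p => match p with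
          | [a, b] => pvRelabel rep a b
          | [] => rep
          | [_] => rep
          | _ :: _ :: _ :: _ => rep) PySem.Dict.empty) x))).length = 1 := by
      rw [pvSet_len_one, pvSet_len_one]
      simp only [List.forall_mem_map, ne_eq, List.map_eq_nil_iff]
      constructor
      · rintro ⟨h1, h2⟩
        exact ⟨h1, fun x hx y hy => (hbis x y).1 (h2 x hx y hy)⟩
      · rintro ⟨h1, h2⟩
        exact ⟨h1, fun x hx y hy => (hbis x y).2 (h2 x hx y hy)⟩
    by_cases hone : (PySem.Set.ofList (ids.map (fun x => pvPf (pairs.foldl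
        (fun rep p => match p with
          | [a, b] => pvRelabel rep a b
          | [] => rep
          | [_] => rep
          | _ :: _ :: _ :: _ => rep) PySem.Dict.empty) x))).length = 1
    · rw [if_neg (by simpa using hiff.2 hone), if_neg (by simpa using hone)]
    · rw [if_pos (by simpa using fun h => hone (hiff.1 h)), if_pos (by simpa using hone)]
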